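-- pv_equiv track=rewrite | github.com/pgorecki/aisd | kolokwia/2016_kolo1_rozw.py | najmniejsza_suma
-- ===== SOURCE A (Python) =====
-- def najmniejsza_suma(macierz):
--     wyniki = []
--     # sumy wierszy
--     for w in range(len(macierz)):
--         suma = 0
--         for k in range(len(macierz[0])):
--             suma += macierz[w][k]
--         wyniki.append(suma)
--     # sumy kolumn
--     for k in range(len(macierz[0])):
--         suma = 0
--         for w in range(len(macierz)):
--             suma += macierz[w][k]
--         wyniki.append(suma)
--
--     return min(wyniki)
-- ===== SOURCE B (Python) =====
-- def najmniejsza_suma(macierz):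
--     ncols = len(macierz[0])
--     col_sums = [0] * ncols
--     row_sums = []
--     for row in macierz:
--         row_sums.append(sum(row[:ncols]))
--         col_sums = [c + v for c, v in zip(col_sums, row)]
--     return min(row_sums + col_sums)
-- ===== Notes on version B (the rewrite author's own statement) =====
-- stated objective: alternative
-- what changed: Replaces A's two separate nested index loops (row sums, then a column-major pass re-scanning the whole matrix per column) with a single row-major pass that maintains a column-sum accumulator updated by zip, then takes one min.
import Mathlib
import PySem

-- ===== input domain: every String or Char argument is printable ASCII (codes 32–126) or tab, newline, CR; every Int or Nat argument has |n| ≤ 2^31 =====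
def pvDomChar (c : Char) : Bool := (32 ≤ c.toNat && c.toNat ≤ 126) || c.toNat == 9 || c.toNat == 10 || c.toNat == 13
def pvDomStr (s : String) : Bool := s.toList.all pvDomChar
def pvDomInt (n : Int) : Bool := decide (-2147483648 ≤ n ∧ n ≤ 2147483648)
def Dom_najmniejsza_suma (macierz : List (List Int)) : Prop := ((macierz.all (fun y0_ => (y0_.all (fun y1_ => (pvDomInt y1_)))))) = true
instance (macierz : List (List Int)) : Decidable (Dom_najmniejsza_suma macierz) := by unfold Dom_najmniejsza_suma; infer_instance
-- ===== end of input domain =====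

-- B fuses A's two nested index passes into one row-major pass with a zip-maintained
-- column-sum accumulator; same cost, different traversal (objective: alternative).

-- ===== PORT A =====
def najmniejsza_suma (macierz : List (List Int)) : Int :=
  let n0 : Int := PySem.List.len (PySem.List.pyGetD macierz 0 [])
  -- sumy wierszy
  let wyniki1 : List Int := (PySem.List.pyRange 0 (PySem.List.len macierz) 1).foldl
    (fun acc w => acc ++ [(PySem.List.pyRange 0 n0 1).foldl
        (fun suma k => suma + PySem.List.pyGetD (PySem.List.pyGetD macierz w []) k 0) 0]) []
  -- sumy kolumn
  let wyniki2 : List Int := (PySem.List.pyRange 0 n0 1).foldl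
    (fun acc k => acc ++ [(PySem.List.pyRange 0 (PySem.List.len macierz) 1).foldl
        (fun suma w => suma + PySem.List.pyGetD (PySem.List.pyGetD macierz w []) k 0) 0]) wyniki1
  (PySem.List.min? wyniki2 id).getD 0   -- min(wyniki); Pre_ guarantees wyniki ≠ []

-- ===== PORT B =====
def najmniejsza_suma_alt (macierz : List (List Int)) : Int :=
  let ncols : Int := PySem.List.len (PySem.List.pyGetD macierz 0 [])
  let st := macierz.foldl
    (fun (st : List Int × List Int) row =>
      (st.1 ++ [(PySem.List.slice row none (some ncols)).sum],
       (st.2.zip row).map (fun p => p.1 + p.2)))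
    ([], List.replicate ncols.toNat 0)
  (PySem.List.min? (st.1 ++ st.2) id).getD 0   -- min(row_sums + col_sums); Pre_ guarantees nonempty

-- ===== PRECONDITION & SPEC =====
-- A raises IndexError on the empty matrix (macierz[0]) and when some row is shorter
-- than the first row (macierz[w][k] with k < len(macierz[0])); exactly those are excluded.
def Pre_najmniejsza_suma (macierz : List (List Int)) : Prop :=
  macierz ≠ [] ∧ ∀ row ∈ macierz, (macierz.headD []).length ≤ row.length
instance (macierz : List (List Int)) : Decidable (Pre_najmniejsza_suma macierz) := by
  unfold Pre_najmniejsza_suma; infer_instance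

def pvWitness_najmniejsza_suma : List (List Int) := [[1, 2], [3, 4], [5, -6]]

def Spec_najmniejsza_suma (macierz : List (List Int)) (out : Int) : Prop := out = najmniejsza_suma_alt macierz
instance (macierz : List (List Int)) (out : Int) : Decidable (Spec_najmniejsza_suma macierz out) := by unfold Spec_najmniejsza_suma; infer_instance

-- ===== CLAIM (what is proved, stated in full; the proofs are below) =====
def Claim_equal_najmniejsza_suma : Prop := ∀ (macierz : List (List Int)), Dom_najmniejsza_suma macierz → Pre_najmniejsza_suma macierz → Spec_najmniejsza_suma macierz (najmniejsza_suma macierz)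

-- ===== LEMMAS AND PROOFS =====

-- sum of the first n entries of a row, written as A's index loop
theorem sum_range_getD (row : List Int) (n : Nat) (h : n ≤ row.length) :
    (List.range n).foldl (fun s k => s + row.getD k 0) 0 = (row.take n).sum := by
  induction n with
  | zero => simp
  | succ m ih =>
    have hm : m < row.length := by omega
    rw [List.range_succ, List.foldl_append, ih (by omega)]
    show (List.take m row).sum + row.getD m 0 = (List.take (m+1) row).sum
    rw [List.take_add_one, List.sum_append, List.getD_eq_getElem row 0 hm,
        List.getElem?_eq_getElem hm]
    simp

-- B's zip accumulator after folding the rows: old entry plus the column sum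
theorem zip_fold_cols (L : List (List Int)) (cs : List Int)
    (h : ∀ row ∈ L, cs.length ≤ row.length) :
    L.foldl (fun cs row => (cs.zip row).map (fun p => p.1 + p.2)) cs
      = (List.range cs.length).map
          (fun i => cs.getD i 0 + (L.map (fun row => row.getD i 0)).sum) := by
  induction L generalizing cs with
  | nil =>
    simp only [List.foldl_nil, List.map_nil, List.sum_nil, add_zero]
    refine (List.ext_getElem (by simp) ?_).symm
    intro i h1 h2
    simp only [List.getElem_map, List.getElem_range]
    rw [List.getD_eq_getElem _ _ (by simpa using h2)]
  | cons r L ih =>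
    have hr : cs.length ≤ r.length := h r (by simp)
    have hlen : ((cs.zip r).map (fun p => p.1 + p.2)).length = cs.length := by
      simp; omega
    rw [List.foldl_cons, ih _ (by intro row hm; rw [hlen]; exact h row (by simp [hm]))]
    rw [hlen]
    refine List.map_congr_left ?_
    intro i hi
    rw [List.mem_range] at hi
    have h1 : ((cs.zip r).map (fun p => p.1 + p.2)).getD i 0
        = cs.getD i 0 + r.getD i 0 := by
      rw [List.getD_eq_getElem _ _ (by omega)]
      rw [List.getD_eq_getElem _ _ (by omega), List.getD_eq_getElem _ _ (by omega)]
      simp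
    rw [h1]
    simp [add_assoc]

-- the two ports agree on admitted inputs
theorem ports_agree (macierz : List (List Int)) (hne : macierz ≠ [])
    (hlen : ∀ row ∈ macierz, (macierz.headD []).length ≤ row.length) :
    najmniejsza_suma macierz = najmniejsza_suma_alt macierz := by
  obtain ⟨r0, rest, rfl⟩ : ∃ r0 rest, macierz = r0 :: rest := by
    cases macierz with
    | nil => exact absurd rfl hne
    | cons a l => exact ⟨a, l, rfl⟩
  have hhead : ∀ row ∈ r0 :: rest, r0.length ≤ row.length := by
    simpa using hlen
  unfold najmniejsza_suma najmniejsza_suma_alt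
  simp only [PySem.List.pyGetD_of_nonneg _ _ (by norm_num : (0:Int) ≤ 0)]
  have hcast : PySem.List.len ((r0 :: rest).getD (Int.toNat 0) []) = (r0.length : Int) := rfl
  rw [hcast]
  set M := r0 :: rest with hM
  set n : Nat := r0.length with hn
  -- A side: inner loop of the first pass over a fixed row
  have hrow : ∀ row : List Int, n ≤ row.length →
      (PySem.List.pyRange 0 (n : Int) 1).foldl (fun suma k => suma + PySem.List.pyGetD row k 0) 0
        = (row.take n).sum := by
    intro row hr
    rw [PySem.List.pyRange_zero_nat, List.foldl_map]
    rw [← sum_range_getD row n hr]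
    refine PySem.List.foldl_congr_mem _ _ _ _ ?_
    intro a x _
    rw [PySem.List.pyGetD_of_nonneg _ _ (by positivity)]
    simp
  -- A side: first pass becomes a map over the rows, second pass a map over the columns
  rw [PySem.List.foldl_pyRange_zero_pyGetD M [] (fun acc row =>
        acc ++ [(PySem.List.pyRange 0 (n:Int) 1).foldl (fun suma k => suma + PySem.List.pyGetD row k 0) 0]) []]
  simp only [PySem.List.foldl_append_singleton_eq_map, List.nil_append]
  -- B side: split the pair fold
  rw [PySem.List.foldl_prod_mk
        (fun (acc : List Int) (row : List Int) => acc ++ [(PySem.List.slice row none (some (n:Int))).sum])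
        (fun (cs : List Int) (row : List Int) => (cs.zip row).map (fun p => p.1 + p.2)) M [] _]
  simp only [PySem.List.foldl_append_singleton_eq_map, List.nil_append]
  rw [zip_fold_cols M _ (by
        intro row hm
        simp only [List.length_replicate, Int.toNat_natCast]
        exact hn ▸ hhead row hm)]
  simp only [List.length_replicate, Int.toNat_natCast]
  congr 2
  refine congrArg₂ (· ++ ·) ?_ ?_
  · -- row sums agree
    refine List.map_congr_left ?_
    intro row hm
    rw [hrow row (hn ▸ hhead row hm), PySem.List.slice_to row (by positivity)]
    simp
  · -- column sums agree
    rw [PySem.List.pyRange_zero_nat, List.map_map]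
    refine List.map_congr_left ?_
    intro i hi
    simp only [Function.comp]
    rw [PySem.List.foldl_pyRange_zero_pyGetD M [] (fun suma row => suma + PySem.List.pyGetD row (i:Int) 0) 0]
    rw [PySem.List.foldl_congr_mem M _ (fun s row => s + row.getD i 0) 0 (by
          intro a row _
          rw [PySem.List.pyGetD_of_nonneg _ _ (by positivity)]
          simp)]
    rw [PySem.List.foldl_add M (fun row => row.getD i 0) 0]
    have hrep : (List.replicate n (0:Int)).getD i 0 = 0 := by
      by_cases h : i < n
      · rw [List.getD_eq_getElem _ _ (by simpa using h)]; simp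
      · rw [List.getD_eq_default _ _ (by simpa using h)]
    rw [hrep]

-- ===== VERDICT (by name: the statement is the Claim_ definition above) =====
theorem najmniejsza_suma_spec : Claim_equal_najmniejsza_suma := by
  intro macierz _ hpre
  unfold Spec_najmniejsza_suma
  exact ports_agree macierz hpre.1 hpre.2
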